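-- pv_equiv track=rewrite | github.com/ibm-build-lab/ShareThis-Predictive-Multilabel-Classification | app/src/category_matcher.py | create_frequency_buckets
-- ===== SOURCE A (Python) =====
-- from collections import Counter
-- from typing import List, Dict, Tuple
--
-- def create_frequency_buckets(label_counts: Counter) -> Dict[str, str]:
--     """Create frequency buckets for categories"""
--     bucket_map = {}
--     for cat, freq in label_counts.items():
--         if freq >= 30:
--             bucket_map[cat] = "very high"
--         elif freq >= 20:
--             bucket_map[cat] = "high"
--         elif freq >= 9:
--             bucket_map[cat] = "medium"
--         elif freq >= 4:
--             bucket_map[cat] = "low"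
--         else:
--             bucket_map[cat] = "none"
--     return bucket_map
-- ===== SOURCE B (Python) =====
-- def create_frequency_buckets(label_counts):
--     """Create frequency buckets for categories (threshold table + binary search)."""
--     breaks = [4, 9, 20, 30]
--     labels = ["none", "low", "medium", "high", "very high"]
--     bucket_map = {}
--     for cat, freq in label_counts.items():
--         lo, hi = 0, len(breaks)
--         while lo < hi:
--             mid = (lo + hi) // 2
--             if freq < breaks[mid]:
--                 hi = mid
--             else:
--                 lo = mid + 1
--         bucket_map[cat] = labels[lo]
--     return bucket_map
-- ===== Notes on version B (the rewrite author's own statement) =====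
-- stated objective: idiomatic
-- what changed: Replaces the five-way if/elif cascade with a sorted threshold table [4,9,20,30], a parallel labels list, and a hand-written binary search (bisect_right) choosing the label index.
import Mathlib
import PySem

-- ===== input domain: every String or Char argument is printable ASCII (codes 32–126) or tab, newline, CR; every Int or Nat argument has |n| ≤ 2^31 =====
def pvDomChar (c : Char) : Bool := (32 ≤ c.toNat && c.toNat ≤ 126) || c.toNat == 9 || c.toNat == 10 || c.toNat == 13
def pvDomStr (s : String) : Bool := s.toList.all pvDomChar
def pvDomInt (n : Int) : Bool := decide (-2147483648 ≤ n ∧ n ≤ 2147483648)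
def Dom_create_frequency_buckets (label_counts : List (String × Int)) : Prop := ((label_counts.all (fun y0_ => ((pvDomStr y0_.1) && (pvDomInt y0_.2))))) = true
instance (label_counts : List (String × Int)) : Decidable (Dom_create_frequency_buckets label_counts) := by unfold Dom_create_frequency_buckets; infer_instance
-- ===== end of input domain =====

-- B replaces A's if/elif cascade with a threshold table and a binary search; equivalence is proved for all inputs.

-- ===== PORT A =====
def create_frequency_buckets (label_counts : List (String × Int)) : List (String × String) :=
  (label_counts.foldl (fun (bucket_map : PySem.Dict String String) cf =>
    let cat := cf.1
    let freq := cf.2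
    if freq ≥ 30 then bucket_map.insert cat "very high"
    else if freq ≥ 20 then bucket_map.insert cat "high"
    else if freq ≥ 9 then bucket_map.insert cat "medium"
    else if freq ≥ 4 then bucket_map.insert cat "low"
    else bucket_map.insert cat "none") (PySem.Dict.empty)).items

-- ===== PORT B =====
-- hand-written bisect_right loop from Source B, step for step (lo, hi over the breaks table)
def cfbBisect (breaks : List Int) (freq : Int) (lo hi : Nat) : Nat :=
  if lo < hi then
    let mid := (lo + hi) / 2
    if freq < breaks.getD mid 0 then cfbBisect breaks freq lo mid
    else cfbBisect breaks freq (mid + 1) hi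
  else lo
termination_by hi - lo
decreasing_by all_goals omega

def create_frequency_buckets_alt (label_counts : List (String × Int)) : List (String × String) :=
  let breaks : List Int := [4, 9, 20, 30]
  let labels : List String := ["none", "low", "medium", "high", "very high"]
  (label_counts.foldl (fun (bucket_map : PySem.Dict String String) cf =>
    bucket_map.insert cf.1 (labels.getD (cfbBisect breaks cf.2 0 breaks.length) ""))
    (PySem.Dict.empty)).items

-- ===== PRECONDITION & SPEC =====
def Spec_create_frequency_buckets (label_counts : List (String × Int)) (out : List (String × String)) : Prop := out = create_frequency_buckets_alt label_counts
instance (label_counts : List (String × Int)) (out : List (String × String)) : Decidable (Spec_create_frequency_buckets label_counts out) := by unfold Spec_create_frequency_buckets; infer_instance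

-- ===== CLAIM (what is proved, stated in full; the proofs are below) =====
def Claim_equal_create_frequency_buckets : Prop := ∀ (label_counts : List (String × Int)), Dom_create_frequency_buckets label_counts → Spec_create_frequency_buckets label_counts (create_frequency_buckets label_counts)

-- ===== LEMMAS AND PROOFS =====

theorem cfbBisect_base (b : List Int) (f : Int) (n : Nat) : cfbBisect b f n n = n := by
  rw [cfbBisect.eq_def]; simp

-- closed evaluation of the binary search over the fixed 4-entry table
theorem cfbBisect_eval (freq : Int) :
    cfbBisect [4, 9, 20, 30] freq 0 4 =
      if 30 ≤ freq then 4 else if 20 ≤ freq then 3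
      else if 9 ≤ freq then 2 else if 4 ≤ freq then 1 else 0 := by
  rw [cfbBisect.eq_def]; norm_num [List.getD]
  by_cases h20 : freq < 20
  · rw [if_pos h20, cfbBisect.eq_def]; norm_num [List.getD]
    by_cases h9 : freq < 9
    · rw [if_pos h9, cfbBisect.eq_def]; norm_num [List.getD]
      by_cases h4 : freq < 4
      · rw [if_pos h4, cfbBisect_base]; split_ifs <;> omega
      · rw [if_neg h4, cfbBisect_base]; split_ifs <;> omega
    · rw [if_neg h9, cfbBisect_base]; split_ifs <;> omega
  · rw [if_neg h20, cfbBisect.eq_def]; norm_num [List.getD]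
    by_cases h30 : freq < 30
    · rw [if_pos h30, cfbBisect_base]; split_ifs <;> omega
    · rw [if_neg h30, cfbBisect_base]; split_ifs <;> omega

-- pointwise: the table lookup equals the cascade's label
theorem cfb_bucket_eq (freq : Int) :
    (["none", "low", "medium", "high", "very high"].getD
        (cfbBisect [4, 9, 20, 30] freq 0 4) "") =
    (if freq ≥ 30 then "very high"
     else if freq ≥ 20 then "high"
     else if freq ≥ 9 then "medium"
     else if freq ≥ 4 then "low"
     else "none") := by
  rw [cfbBisect_eval]
  split_ifs <;> rfl

theorem cfb_fold_eq (label_counts : List (String × Int)) (d : PySem.Dict String String) :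
    label_counts.foldl (fun (bucket_map : PySem.Dict String String) cf =>
      let cat := cf.1
      let freq := cf.2
      if freq ≥ 30 then bucket_map.insert cat "very high"
      else if freq ≥ 20 then bucket_map.insert cat "high"
      else if freq ≥ 9 then bucket_map.insert cat "medium"
      else if freq ≥ 4 then bucket_map.insert cat "low"
      else bucket_map.insert cat "none") d =
    label_counts.foldl (fun (bucket_map : PySem.Dict String String) cf =>
      bucket_map.insert cf.1
        ((["none", "low", "medium", "high", "very high"]).getD
          (cfbBisect [4, 9, 20, 30] cf.2 0 4) "")) d := by
  induction label_counts generalizing d with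
  | nil => rfl
  | cons hd tl ih =>
    simp only [List.foldl_cons]
    rw [cfb_bucket_eq hd.2, ih]
    congr 1
    split_ifs <;> rfl

-- ===== VERDICT (by name: the statement is the Claim_ definition above) =====
theorem create_frequency_buckets_spec : Claim_equal_create_frequency_buckets := by
  intro lc _
  unfold Spec_create_frequency_buckets create_frequency_buckets create_frequency_buckets_alt
  exact congrArg PySem.Dict.items (cfb_fold_eq lc PySem.Dict.empty)
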